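-- pv_equiv track=rewrite | github.com/daviH98/Mapeamento-Memoria-Cache | src/cache_substituicao_sem_comentarios.py | mru_faltas
-- ===== SOURCE A (Python) =====
-- from typing import List, Tuple
--
-- def mru_faltas(sequencia: List[int], quadros: int) -> Tuple[List[int], int]:
--     memoria = [None] * quadros
--     ultima_vez_usado = {}
--     tempo = 0
--     faltas = 0
--     for pagina in sequencia:
--         tempo += 1
--         if pagina in memoria:
--             ultima_vez_usado[pagina] = tempo
--         else:
--             faltas += 1
--             if None in memoria:
--                 pos = memoria.index(None)
--                 memoria[pos] = pagina
--                 ultima_vez_usado[pagina] = tempo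
--             else:
--                 pagina_mru = max(ultima_vez_usado, key=ultima_vez_usado.get)
--                 pos = memoria.index(pagina_mru)
--                 del ultima_vez_usado[pagina_mru]
--                 memoria[pos] = pagina
--                 ultima_vez_usado[pagina] = tempo
--     return memoria, faltas
-- ===== SOURCE B (Python) =====
-- from typing import List, Tuple
--
-- def mru_faltas(sequencia: List[int], quadros: int) -> Tuple[List[int], int]:
--     # MRU = the most recently accessed page still resident, so a single variable
--     # replaces A's timestamp dict + max scan; a position map replaces list.index.
--     frames = []      # resident pages in frame order (grows up to quadros)
--     pos = {}         # page -> frame index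
--     mru = None       # page most recently used
--     faltas = 0
--     for p in sequencia:
--         if p in pos:
--             mru = p
--         else:
--             faltas += 1
--             if len(frames) < quadros:
--                 pos[p] = len(frames)
--                 frames.append(p)
--             else:
--                 i = pos.pop(mru)
--                 frames[i] = p
--                 pos[p] = i
--             mru = p
--     return frames + [None] * (quadros - len(frames)), faltas
-- ===== Notes on version B (the rewrite author's own statement) =====
-- stated objective: faster
-- what changed: B drops A's timestamp dict, max() scan and list.index scans entirely: since the page with the newest timestamp is simply the last accessed resident page, B tracks a single mru variable plus a page-to-frame-index dict, doing O(1) work per reference instead of O(quadros) scans.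
-- outside the precondition, e.g. on mru_faltas([1, 2], 0): A raises ValueError, B raises KeyError
import Mathlib
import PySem

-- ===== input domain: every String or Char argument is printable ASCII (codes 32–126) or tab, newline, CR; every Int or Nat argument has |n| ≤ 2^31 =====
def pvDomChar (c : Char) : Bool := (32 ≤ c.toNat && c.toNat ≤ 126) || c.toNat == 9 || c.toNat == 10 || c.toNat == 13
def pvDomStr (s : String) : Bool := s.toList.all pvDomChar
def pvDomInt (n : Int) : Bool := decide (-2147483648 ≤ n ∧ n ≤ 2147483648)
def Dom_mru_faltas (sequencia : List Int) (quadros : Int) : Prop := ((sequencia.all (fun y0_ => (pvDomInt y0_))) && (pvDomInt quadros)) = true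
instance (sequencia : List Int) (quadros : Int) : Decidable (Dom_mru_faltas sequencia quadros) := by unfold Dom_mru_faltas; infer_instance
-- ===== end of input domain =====

-- B replaces A's timestamp dict + max scan + list.index scans by a single
-- most-recently-used variable and a page→frame-index map (objective: faster, no per-fault scans).

-- ===== PORT A =====
-- loop body of A's for-loop (state: memoria, ultima_vez_usado, tempo, faltas)
def pvStepA (st : List (Option Int) × PySem.Dict Int Int × Int × Int) (pagina : Int) :
    List (Option Int) × PySem.Dict Int Int × Int × Int :=
  let memoria := st.1
  let ultima := st.2.1
  let tempo := st.2.2.1 + 1          -- tempo += 1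
  let faltas := st.2.2.2
  if memoria.contains (some pagina) then
    (memoria, ultima.insert pagina tempo, tempo, faltas)
  else
    let faltas := faltas + 1
    if memoria.contains none then
      let pos := (PySem.List.index? memoria (none : Option Int)).getD 0   -- memoria.index(None); some under the guard
      (memoria.set pos (some pagina), ultima.insert pagina tempo, tempo, faltas)
    else
      -- max(ultima_vez_usado, key=ultima_vez_usado.get): every key is present, so .get = getD _ 0;
      -- .getD 0 ports the ValueError on an empty dict (excluded by Pre_)
      let pagina_mru := (PySem.List.max? ultima.keys (fun k => ultima.getD k 0)).getD 0
      let pos := (PySem.List.index? memoria (some pagina_mru)).getD 0     -- memoria.index(pagina_mru)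
      (memoria.set pos (some pagina), (ultima.erase pagina_mru).insert pagina tempo, tempo, faltas)

def mru_faltas (sequencia : List Int) (quadros : Int) : List (Option Int) × Int :=
  -- [None] * quadros
  let fin := sequencia.foldl pvStepA (List.replicate quadros.toNat none, PySem.Dict.empty, 0, 0)
  (fin.1, fin.2.2.2)

-- ===== PORT B =====
-- loop body of B's for-loop (state: frames, pos, mru, faltas)
def pvStepB (quadros : Int) (st : List Int × PySem.Dict Int Int × Option Int × Int) (p : Int) :
    List Int × PySem.Dict Int Int × Option Int × Int :=
  let frames := st.1
  let pos := st.2.1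
  let mru := st.2.2.1
  let faltas := st.2.2.2
  if pos.contains p then
    (frames, pos, some p, faltas)
  else
    let faltas := faltas + 1
    if (frames.length : Int) < quadros then
      (frames ++ [p], pos.insert p (frames.length : Int), some p, faltas)
    else
      -- i = pos.pop(mru): mru is a resident page here; the 0 defaults port the
      -- KeyError path (quadros <= 0), excluded by Pre_
      let m := mru.getD 0
      let i := pos.getD m 0
      (PySem.List.pySetD frames i p, (pos.erase m).insert p i, some p, faltas)

def mru_faltas_alt (sequencia : List Int) (quadros : Int) : List (Option Int) × Int :=
  let fin := sequencia.foldl (pvStepB quadros) ([], PySem.Dict.empty, none, 0)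
  -- frames + [None] * (quadros - len(frames))
  (fin.1.map some ++ List.replicate (quadros - (fin.1.length : Int)).toNat none, fin.2.2.2)

-- ===== PRECONDITION & SPEC =====
-- Pre_ excludes exactly the inputs where A raises: a nonempty sequence with quadros <= 0
-- makes A's max() hit an empty dict (ValueError).
def Pre_mru_faltas (sequencia : List Int) (quadros : Int) : Prop :=
  1 ≤ quadros ∨ sequencia = []

instance (sequencia : List Int) (quadros : Int) : Decidable (Pre_mru_faltas sequencia quadros) := by
  unfold Pre_mru_faltas; infer_instance

def pvWitness_mru_faltas : List Int × Int := ([1, 2, 3, 1, 2, 4], 2)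

def Spec_mru_faltas (sequencia : List Int) (quadros : Int) (out : List (Option Int) × Int) : Prop :=
  out = mru_faltas_alt sequencia quadros

instance (sequencia : List Int) (quadros : Int) (out : List (Option Int) × Int) :
    Decidable (Spec_mru_faltas sequencia quadros out) := by
  unfold Spec_mru_faltas; infer_instance

-- ===== CLAIM =====
def Claim_equal_mru_faltas : Prop :=
  ∀ (sequencia : List Int) (quadros : Int), Dom_mru_faltas sequencia quadros →
    Pre_mru_faltas sequencia quadros →
    Spec_mru_faltas sequencia quadros (mru_faltas sequencia quadros)

-- ===== LEMMAS AND PROOFS =====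

-- first occurrence past a prefix not containing the value
theorem pv_index?_append_of_not_mem {α : Type} [BEq α] [LawfulBEq α] (l t : List α) (v : α)
    (h : v ∉ l) : PySem.List.index? (l ++ t) v = (PySem.List.index? t v).map (· + l.length) := by
  induction l with
  | nil => simp [Option.map_id']
  | cons x xs ih =>
    simp only [List.mem_cons, not_or] at h
    rw [List.cons_append, PySem.List.index?_cons_of_ne _ (show x ≠ v from fun he => h.1 he.symm),
      ih h.2]
    cases PySem.List.index? t v <;> simp <;> omega

-- index? through `map some`
theorem pv_index?_map_some (fr : List Int) (m : Int) :
    PySem.List.index? (fr.map some) (some m) = PySem.List.index? fr m := by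
  induction fr with
  | nil => simp [PySem.List.index?]
  | cons x xs ih =>
    rw [List.map_cons]
    by_cases hx : x = m
    · subst hx; rw [PySem.List.index?_cons_self, PySem.List.index?_cons_self]
    · rw [PySem.List.index?_cons_of_ne _ (show some x ≠ some m by simpa using hx),
        PySem.List.index?_cons_of_ne _ hx, ih]

theorem pv_get?_erase {κ ν : Type} [BEq κ] [LawfulBEq κ] [DecidableEq κ] (d : PySem.Dict κ ν) (k k' : κ) :
    (d.erase k).get? k' = if k' = k then none else d.get? k' := by
  obtain ⟨items⟩ := d
  by_cases h2 : k' = k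
  · subst h2
    simp only [PySem.Dict.erase, PySem.Dict.get?]
    rw [List.find?_eq_none.mpr]
    · rfl
    · intro q hq
      simp only [List.mem_filter] at hq
      simpa using hq.2
  · rw [if_neg h2]
    induction items with
    | nil => rfl
    | cons p rest ih =>
      simp only [PySem.Dict.erase, PySem.Dict.get?, List.filter_cons] at *
      by_cases h1 : p.1 = k
      · rw [if_neg (by simp [h1]), List.find?_cons, ih]
        have : (p.1 == k') = false := by
          simp only [beq_eq_false_iff_ne, ne_eq, h1]
          exact fun he => h2 he.symm
        simp [this]
      · rw [if_pos (by simp [h1]), List.find?_cons, List.find?_cons]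
        by_cases h3 : p.1 = k'
        · simp [h3]
        · have hb : (p.1 == k') = false := by simpa using h3
          rw [hb]
          exact ih

theorem pv_isSome_get?_of_mem_keys {κ ν : Type} [BEq κ] [LawfulBEq κ] (d : PySem.Dict κ ν) (k : κ)
    (h : k ∈ d.keys) : (d.get? k).isSome := by
  rcases Option.eq_none_or_eq_some (d.get? k) with h0 | ⟨v, hv⟩
  · exact absurd ((PySem.Dict.get?_eq_none_iff_not_mem_keys d k).mp h0) (by simpa using h)
  · simp [hv]

theorem pv_max?_aux {α κ : Type} [LinearOrder κ] (key : α → κ) (m : α) :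
    ∀ (xs : List α) (acc : Option α), (∀ y ∈ xs, y ≠ m → key y < key m) →
      (acc = some m ∨ (m ∈ xs ∧ (acc = none ∨ ∃ y, acc = some y ∧ key y < key m))) →
      List.foldl (fun acc x => match acc with
        | none => some x
        | some mm => if key mm < key x then some x else some mm) acc xs = some m := by
  intro xs
  induction xs with
  | nil =>
    rintro acc _ (rfl | ⟨h, -⟩)
    · rfl
    · simp at h
  | cons x t ih =>
    rintro acc hlt (rfl | ⟨hm, hacc⟩)
    · simp only [List.foldl_cons]
      by_cases hx : x = m
      · subst hx
        rw [if_neg (lt_irrefl _)]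
        exact ih _ (fun y hy => hlt y (by simp [hy])) (Or.inl rfl)
      · have := hlt x (by simp) hx
        rw [if_neg (by exact not_lt_of_gt this)]
        exact ih _ (fun y hy => hlt y (by simp [hy])) (Or.inl rfl)
    · simp only [List.foldl_cons]
      rcases hacc with rfl | ⟨y, rfl, hy⟩
      · -- acc = none, step = some x
        by_cases hx : x = m
        · subst hx; exact ih _ (fun y hy => hlt y (by simp [hy])) (Or.inl rfl)
        · have hmt : m ∈ t := by
            rcases List.mem_cons.mp hm with heq | hmt
            · exact absurd heq.symm hx
            · exact hmt
          exact ih _ (fun y hy => hlt y (by simp [hy]))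
            (Or.inr ⟨hmt, Or.inr ⟨x, rfl, hlt x (by simp) hx⟩⟩)
      · change List.foldl _ (if key y < key x then some x else some y) t = some m
        by_cases hx : x = m
        · subst hx
          rw [if_pos hy]
          exact ih _ (fun y hy => hlt y (by simp [hy])) (Or.inl rfl)
        · have hmt : m ∈ t := by
            rcases List.mem_cons.mp hm with heq | hmt
            · exact absurd heq.symm hx
            · exact hmt
          have hxlt := hlt x (by simp) hx
          by_cases hc : key y < key x
          · rw [if_pos hc]
            exact ih _ (fun y hy => hlt y (by simp [hy]))
              (Or.inr ⟨hmt, Or.inr ⟨x, rfl, hxlt⟩⟩)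
          · rw [if_neg hc]
            exact ih _ (fun y hy => hlt y (by simp [hy]))
              (Or.inr ⟨hmt, Or.inr ⟨y, rfl, hy⟩⟩)

theorem pv_max?_eq_of_strict {α κ : Type} [LinearOrder κ] (xs : List α) (key : α → κ) (m : α)
    (hm : m ∈ xs) (hstrict : ∀ y ∈ xs, y ≠ m → key y < key m) :
    PySem.List.max? xs key = some m :=
  pv_max?_aux key m xs none hstrict (Or.inr ⟨hm, Or.inl rfl⟩)

-- the loop invariant tying A's state to B's state (n = quadros.toNat)
def pvInv (n : Nat) (a : List (Option Int) × PySem.Dict Int Int × Int × Int)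
    (b : List Int × PySem.Dict Int Int × Option Int × Int) : Prop :=
  a.1 = b.1.map some ++ List.replicate (n - b.1.length) none ∧
  b.1.length ≤ n ∧
  a.2.2.2 = b.2.2.2 ∧
  b.1.Nodup ∧
  (∀ p, (a.2.1.get? p).isSome ↔ p ∈ b.1) ∧
  (∀ p, b.2.1.get? p = (PySem.List.index? b.1 p).map (fun i => (i : Int))) ∧
  (∀ p t, a.2.1.get? p = some t → t ≤ a.2.2.1) ∧
  (b.1 ≠ [] → ∃ m tm, b.2.2.1 = some m ∧ a.2.1.get? m = some tm ∧
      ∀ p t, a.2.1.get? p = some t → p ≠ m → t < tm)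

-- reduced forms of the two loop bodies
theorem pv_stepA_hit (mem : List (Option Int)) (d : PySem.Dict Int Int) (tempo fa p : Int)
    (h : some p ∈ mem) :
    pvStepA (mem, d, tempo, fa) p = (mem, d.insert p (tempo + 1), tempo + 1, fa) := by
  simp [pvStepA, h]

theorem pv_stepA_fill (mem : List (Option Int)) (d : PySem.Dict Int Int) (tempo fa p : Int)
    (h1 : some p ∉ mem) (h2 : (none : Option Int) ∈ mem) :
    pvStepA (mem, d, tempo, fa) p =
      (mem.set ((PySem.List.index? mem (none : Option Int)).getD 0) (some p),
        d.insert p (tempo + 1), tempo + 1, fa + 1) := by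
  simp [pvStepA, h1, h2]

theorem pv_stepA_evict (mem : List (Option Int)) (d : PySem.Dict Int Int) (tempo fa p : Int)
    (h1 : some p ∉ mem) (h2 : (none : Option Int) ∉ mem) :
    pvStepA (mem, d, tempo, fa) p =
      (mem.set ((PySem.List.index? mem
            (some ((PySem.List.max? d.keys (fun k => d.getD k 0)).getD 0))).getD 0) (some p),
        (d.erase ((PySem.List.max? d.keys (fun k => d.getD k 0)).getD 0)).insert p (tempo + 1),
        tempo + 1, fa + 1) := by
  simp [pvStepA, h1, h2]

theorem pv_stepB_hit (quadros : Int) (fr : List Int) (pos : PySem.Dict Int Int)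
    (mru : Option Int) (fb p : Int) (h : pos.contains p = true) :
    pvStepB quadros (fr, pos, mru, fb) p = (fr, pos, some p, fb) := by
  simp [pvStepB, h]

theorem pv_stepB_fill (quadros : Int) (fr : List Int) (pos : PySem.Dict Int Int)
    (mru : Option Int) (fb p : Int) (h1 : pos.contains p = false)
    (h2 : (fr.length : Int) < quadros) :
    pvStepB quadros (fr, pos, mru, fb) p =
      (fr ++ [p], pos.insert p (fr.length : Int), some p, fb + 1) := by
  simp [pvStepB, h1, h2]

theorem pv_stepB_evict (quadros : Int) (fr : List Int) (pos : PySem.Dict Int Int)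
    (mru : Option Int) (fb p : Int) (h1 : pos.contains p = false)
    (h2 : ¬ (fr.length : Int) < quadros) :
    pvStepB quadros (fr, pos, mru, fb) p =
      (PySem.List.pySetD fr (pos.getD (mru.getD 0) 0) p,
        (pos.erase (mru.getD 0)).insert p (pos.getD (mru.getD 0) 0), some p, fb + 1) := by
  simp [pvStepB, h1, h2]

theorem pv_step_inv (quadros : Int) (hq : 1 ≤ quadros) (a : _) (b : _) (p : Int)
    (h : pvInv quadros.toNat a b) : pvInv quadros.toNat (pvStepA a p) (pvStepB quadros b p) := by
  obtain ⟨mem, d, tempo, fa⟩ := a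
  obtain ⟨fr, pos, mru, fb⟩ := b
  obtain ⟨hmem, hlen, hfal, hnodup, hdmem, hpos, htime, hmru⟩ := h
  simp only [] at hmem hlen hfal hnodup hdmem hpos htime hmru
  -- both guards test residency of p
  have hmemP : (some p ∈ mem) ↔ p ∈ fr := by
    rw [hmem]; simp
  have hposP : pos.contains p = decide (p ∈ fr) := by
    rw [PySem.Dict.contains_eq_isSome_get?, hpos p]
    by_cases hpf : p ∈ fr
    · obtain ⟨i, hi⟩ := Option.isSome_iff_exists.mp ((PySem.List.index?_isSome_iff fr p).mpr hpf)
      rw [hi]; simp [hpf]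
    · rw [(PySem.List.index?_eq_none_iff fr p).mpr hpf]; simp [hpf]
  by_cases hp : p ∈ fr
  · -- HIT
    rw [pv_stepA_hit mem d tempo fa p (hmemP.mpr hp),
        pv_stepB_hit quadros fr pos mru fb p (by simp [hposP, hp])]
    dsimp only [pvInv]
    refine ⟨hmem, hlen, hfal, hnodup, ?_, hpos, ?_, ?_⟩
    · intro q
      rw [PySem.Dict.get?_insert]
      by_cases hq' : q = p <;> simp [hq', hp, hdmem]
    · intro q t hqt
      rw [PySem.Dict.get?_insert] at hqt
      by_cases hq' : q = p
      · simp [hq'] at hqt; omega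
      · have := htime q t (by simpa [hq'] using hqt); omega
    · intro _
      refine ⟨p, tempo + 1, rfl, by rw [PySem.Dict.get?_insert, if_pos rfl], ?_⟩
      intro q t hqt hqp
      rw [PySem.Dict.get?_insert, if_neg hqp] at hqt
      have := htime q t hqt; omega
  · by_cases hfull : fr.length < quadros.toNat
    · -- MISS, free frame
      have hA2 : (none : Option Int) ∈ mem := by
        rw [hmem]
        refine List.mem_append_right _ ?_
        rw [List.mem_replicate]
        exact ⟨by omega, rfl⟩
      have hidx : PySem.List.index? mem (none : Option Int) = some fr.length := by
        subst hmem
        rw [pv_index?_append_of_not_mem _ _ _ (by simp)]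
        have hrep : List.replicate (quadros.toNat - fr.length) (none : Option Int)
            = none :: List.replicate (quadros.toNat - fr.length - 1) none := by
          rw [← List.replicate_succ]; congr 1; omega
        rw [hrep, PySem.List.index?_cons_self]
        simp
      rw [pv_stepA_fill mem d tempo fa p (fun hc => hp (hmemP.mp hc)) hA2,
          pv_stepB_fill quadros fr pos mru fb p (by simp [hposP, hp]) (by omega)]
      dsimp only [pvInv]
      have hset : mem.set ((PySem.List.index? mem (none : Option Int)).getD 0) (some p)
          = (fr ++ [p]).map some ++ List.replicate (quadros.toNat - (fr ++ [p]).length) none := by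
        rw [hidx, hmem]
        simp only [Option.getD_some, List.set_append, List.length_map, lt_irrefl, if_false,
          Nat.sub_self]
        have hrep : List.replicate (quadros.toNat - fr.length) (none : Option Int)
            = none :: List.replicate (quadros.toNat - fr.length - 1) none := by
          rw [← List.replicate_succ]; congr 1; omega
        rw [hrep]
        simp only [List.set_cons_zero, List.map_append, List.map_cons, List.map_nil,
          List.length_append, List.length_cons, List.length_nil]
        rw [List.append_assoc, List.singleton_append]
        congr 3
      refine ⟨hset, by simp; omega, by rw [hfal], ?_, ?_, ?_, ?_, ?_⟩
      · rw [List.nodup_append]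
        refine ⟨hnodup, List.nodup_singleton p, ?_⟩
        intro a ha b hb
        rw [List.mem_singleton] at hb
        subst hb
        exact fun he => hp (he ▸ ha)
      · intro q
        rw [PySem.Dict.get?_insert]
        by_cases hq' : q = p <;> simp [hq', hdmem]
      · intro q
        rw [PySem.Dict.get?_insert]
        by_cases hq' : q = p
        · subst hq'
          rw [if_pos rfl, PySem.List.index?_append_singleton_self fr q hp]
          simp
        · rw [if_neg hq', hpos q]
          by_cases hq2 : q ∈ fr
          · rw [PySem.List.index?_append_of_mem _ hq2]
          · rw [(PySem.List.index?_eq_none_iff fr q).mpr hq2,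
              (PySem.List.index?_eq_none_iff _ q).mpr (by simp [hq2, hq'])]
      · intro q t hqt
        rw [PySem.Dict.get?_insert] at hqt
        by_cases hq' : q = p
        · simp [hq'] at hqt; omega
        · have := htime q t (by simpa [hq'] using hqt); omega
      · intro _
        refine ⟨p, tempo + 1, rfl, by rw [PySem.Dict.get?_insert, if_pos rfl], ?_⟩
        intro q t hqt hqp
        rw [PySem.Dict.get?_insert, if_neg hqp] at hqt
        have := htime q t hqt; omega
    · -- MISS, eviction
      have hlenq : fr.length = quadros.toNat := by omega
      have hfr0 : fr ≠ [] := by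
        intro h0; rw [h0] at hlenq; simp at hlenq; omega
      obtain ⟨m, tm, hm, hgm, hmax⟩ := hmru hfr0
      have hmfr : m ∈ fr := (hdmem m).mp (by simp [hgm])
      have hmp : m ≠ p := fun he => hp (he ▸ hmfr)
      have hmemeq : mem = fr.map some := by
        rw [hmem, hlenq]; simp
      have hA2 : (none : Option Int) ∉ mem := by
        rw [hmemeq]; simp
      -- the max over the timestamp dict is exactly B's mru variable
      have hmaxeq : PySem.List.max? d.keys (fun k => d.getD k 0) = some m := by
        apply pv_max?_eq_of_strict
        · by_contra hnm
          rw [← PySem.Dict.get?_eq_none_iff_not_mem_keys] at hnm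
          rw [hnm] at hgm; exact absurd hgm (by simp)
        · intro k hk hkm
          obtain ⟨t, ht⟩ := Option.isSome_iff_exists.mp (pv_isSome_get?_of_mem_keys d k hk)
          rw [PySem.Dict.getD_eq_get?_getD, PySem.Dict.getD_eq_get?_getD, ht, hgm]
          simpa using hmax k t ht hkm
      -- position of m in fr
      obtain ⟨i, hi⟩ := Option.isSome_iff_exists.mp
        ((PySem.List.index?_isSome_iff fr m).mpr hmfr)
      obtain ⟨u, v, hfru, hul, hmu⟩ := (PySem.List.index?_eq_some_iff fr m i).mp hi
      have hposm : pos.getD m 0 = (i : Int) := by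
        rw [PySem.Dict.getD_eq_get?_getD, hpos m, hi]; rfl
      rw [pv_stepA_evict mem d tempo fa p (fun hc => hp (hmemP.mp hc)) hA2,
          pv_stepB_evict quadros fr pos mru fb p (by simp [hposP, hp]) (by omega)]
      dsimp only [pvInv]
      rw [hmaxeq, hm]
      simp only [Option.getD_some, hposm, PySem.List.pySetD_natCast]
      have hidxm : PySem.List.index? mem (some m) = some i := by
        rw [hmemeq, pv_index?_map_some, hi]
      rw [hidxm]
      simp only [Option.getD_some]
      -- the two updated frame lists coincide
      have hsetfr : fr.set i p = u ++ p :: v := by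
        rw [hfru, List.set_append, if_neg (by omega), ← hul, Nat.sub_self, List.set_cons_zero]
      have hsetmem : mem.set i (some p) = (fr.set i p).map some := by
        rw [hmemeq, List.map_set]
      -- frame-list facts
      have hpu : p ∉ u := fun hx => hp (hfru ▸ List.mem_append_left _ hx)
      have hpv : p ∉ v := fun hx => hp (hfru ▸ List.mem_append_right _ (List.mem_cons_of_mem _ hx))
      have hnodup' : (u ++ m :: v).Nodup := hfru ▸ hnodup
      have hmv : m ∉ v := by
        rcases List.nodup_append.mp hnodup' with ⟨-, hcons, -⟩
        exact (List.nodup_cons.mp hcons).1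
      have hmset : m ∉ u ++ p :: v := by
        simp only [List.mem_append, List.mem_cons]
        rintro (h1 | h2 | h3)
        · exact hmu h1
        · exact hmp h2
        · exact hmv h3
      have hmemset : ∀ q : Int, q ∈ u ++ p :: v ↔ (q = p ∨ (q ∈ fr ∧ q ≠ m)) := by
        intro q
        constructor
        · simp only [List.mem_append, List.mem_cons]
          rintro (h1 | h2 | h3)
          · refine Or.inr ⟨hfru ▸ List.mem_append_left _ h1, fun he => hmu (he ▸ h1)⟩
          · exact Or.inl h2
          · refine Or.inr ⟨hfru ▸ List.mem_append_right _ (List.mem_cons_of_mem _ h3),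
              fun he => hmv (he ▸ h3)⟩
        · rintro (rfl | ⟨hqfr, hqm⟩)
          · simp
          · rw [hfru] at hqfr
            simp only [List.mem_append, List.mem_cons] at hqfr ⊢
            rcases hqfr with h1 | h2 | h3
            · exact Or.inl h1
            · exact absurd h2 hqm
            · exact Or.inr (Or.inr h3)
      have hlenset : (u ++ p :: v).length = fr.length := by
        rw [hfru]; simp
      refine ⟨?_, ?_, by rw [hfal], ?_, ?_, ?_, ?_, ?_⟩
      · rw [hsetmem, hsetfr, hlenset, hlenq]
        simp
      · rw [hsetfr, hlenset]; omega
      · rw [hsetfr]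
        rcases List.nodup_append.mp hnodup' with ⟨hu, hcons, hdisj⟩
        rcases List.nodup_cons.mp hcons with ⟨-, hv⟩
        rw [List.nodup_append]
        refine ⟨hu, List.nodup_cons.mpr ⟨hpv, hv⟩, ?_⟩
        intro a ha b hb
        rcases List.mem_cons.mp hb with rfl | hb'
        · exact fun he => hpu (he ▸ ha)
        · exact hdisj a ha b (List.mem_cons_of_mem _ hb')
      · intro q
        rw [hsetfr, PySem.Dict.get?_insert, pv_get?_erase]
        by_cases hq1 : q = p
        · simp [hq1, (hmemset p).mpr (Or.inl rfl)]
        · rw [if_neg hq1]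
          by_cases hq2 : q = m
          · simp [hq2, hmset]
          · rw [if_neg hq2]
            rw [hdmem q, hmemset q]
            simp [hq1, hq2]
      · intro q
        rw [hsetfr, PySem.Dict.get?_insert, pv_get?_erase]
        by_cases hq1 : q = p
        · subst hq1
          rw [if_pos rfl, pv_index?_append_of_not_mem _ _ _ hpu,
            PySem.List.index?_cons_self]
          simp [hul]
        · rw [if_neg hq1]
          by_cases hq2 : q = m
          · subst hq2
            rw [if_pos rfl, (PySem.List.index?_eq_none_iff _ q).mpr hmset]
            rfl
          · rw [if_neg hq2, hpos q, hfru]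
            by_cases hq3 : q ∈ u
            · rw [PySem.List.index?_append_of_mem _ hq3, PySem.List.index?_append_of_mem _ hq3]
            · rw [pv_index?_append_of_not_mem _ _ _ hq3, pv_index?_append_of_not_mem _ _ _ hq3,
                PySem.List.index?_cons_of_ne _ (fun he => hq2 he.symm),
                PySem.List.index?_cons_of_ne _ (fun he => hq1 he.symm)]
      · intro q t hqt
        rw [PySem.Dict.get?_insert, pv_get?_erase] at hqt
        by_cases hq1 : q = p
        · simp [hq1] at hqt; omega
        · rw [if_neg hq1] at hqt
          by_cases hq2 : q = m
          · rw [if_pos hq2] at hqt; exact absurd hqt (by simp)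
          · have := htime q t (by rwa [if_neg hq2] at hqt); omega
      · intro _
        refine ⟨p, tempo + 1, rfl, by rw [PySem.Dict.get?_insert, if_pos rfl], ?_⟩
        intro q t hqt hqp
        rw [PySem.Dict.get?_insert, if_neg hqp, pv_get?_erase] at hqt
        by_cases hq2 : q = m
        · rw [if_pos hq2] at hqt; exact absurd hqt (by simp)
        · have := htime q t (by rwa [if_neg hq2] at hqt); omega

theorem pv_fold_inv (quadros : Int) (hq : 1 ≤ quadros) (seq : List Int) (a : _) (b : _)
    (h : pvInv quadros.toNat a b) :
    pvInv quadros.toNat (seq.foldl pvStepA a) (seq.foldl (pvStepB quadros) b) := by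
  induction seq generalizing a b with
  | nil => exact h
  | cons x xs ih => exact ih _ _ (pv_step_inv quadros hq a b x h)

-- ===== VERDICT =====
theorem mru_faltas_spec : Claim_equal_mru_faltas := by
  intro seq quadros _ hpre
  unfold Spec_mru_faltas mru_faltas mru_faltas_alt
  rcases hpre with hq | hnil
  · have h0 : pvInv quadros.toNat
        (List.replicate quadros.toNat none, PySem.Dict.empty, 0, 0)
        ([], PySem.Dict.empty, none, 0) := by
      refine ⟨by simp, by simp, rfl, by simp, ?_, ?_, ?_, by simp⟩
      · intro p; simp [PySem.Dict.get?_empty]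
      · intro p; simp [PySem.Dict.get?_empty, PySem.List.index?]
      · intro p t h; simp [PySem.Dict.get?_empty] at h
    have h := pv_fold_inv quadros hq seq _ _ h0
    obtain ⟨hmem, hlen, hf, -⟩ := h
    simp only []
    refine Prod.ext ?_ hf
    rw [hmem]
    congr 2
    omega
  · subst hnil; simp
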